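-- pv_equiv track=rewrite | github.com/SignifAi/notify-signifai-zabbix | send_signifai.py | zabbix_key_to_signifai_key
-- ===== SOURCE A (Python) =====
-- def zabbix_key_to_signifai_key(k):
--     i = k.lower()
--     replacements = [
--         (".", "/"),
--         (" ", "_"),
--         ("(", ""),
--         (")", "")
--     ]
--
--     for rep in replacements:
--         i = i.replace(*rep)
--
--     return i
-- ===== SOURCE B (Python) =====
-- _MAP = {".": "/", " ": "_", "(": "", ")": ""}
--
--
-- def zabbix_key_to_signifai_key(k):
--     return "".join(_MAP.get(c, c) for c in k.lower())
-- ===== Notes on version B (the rewrite author's own statement) =====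
-- stated objective: idiomatic
-- what changed: Replaces the loop over a replacement list with four full-string replace passes by a single character-level pass that maps each lowercased character through a translation table and joins the pieces.
import Mathlib
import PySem

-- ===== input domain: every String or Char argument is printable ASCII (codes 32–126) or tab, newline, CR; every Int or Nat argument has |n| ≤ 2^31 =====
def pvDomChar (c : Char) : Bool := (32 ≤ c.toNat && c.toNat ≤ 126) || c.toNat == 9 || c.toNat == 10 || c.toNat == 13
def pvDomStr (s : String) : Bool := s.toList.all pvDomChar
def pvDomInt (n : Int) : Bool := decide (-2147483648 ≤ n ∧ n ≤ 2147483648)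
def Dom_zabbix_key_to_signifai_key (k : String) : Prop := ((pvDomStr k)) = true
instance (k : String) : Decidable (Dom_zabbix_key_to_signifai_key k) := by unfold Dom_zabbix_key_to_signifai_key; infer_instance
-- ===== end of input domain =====

-- B replaces the loop of four whole-string replace passes by one character-level
-- pass through a translation table (idiomatic; return value only, no mutation).

-- ===== PORT A =====
def zabbix_key_to_signifai_key (k : String) : String :=
  let i := PySem.Str.lower k
  let replacements : List (String × String) := [(".", "/"), (" ", "_"), ("(", ""), (")", "")]
  replacements.foldl (fun i rep => PySem.Str.replace i rep.1 rep.2) i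

-- ===== PORT B =====
-- _MAP.get(c, c) for the four-entry table, written as the match it denotes
def pvMapChar (c : Char) : List Char :=
  match c with
  | '.' => ['/']
  | ' ' => ['_']
  | '(' => []
  | ')' => []
  | c => [c]

def zabbix_key_to_signifai_key_alt (k : String) : String :=
  String.ofList ((PySem.Chars.lower k.toList).flatMap pvMapChar)

-- ===== PRECONDITION & SPEC =====
def Spec_zabbix_key_to_signifai_key (k : String) (out : String) : Prop := out = zabbix_key_to_signifai_key_alt k
instance (k : String) (out : String) : Decidable (Spec_zabbix_key_to_signifai_key k out) := by unfold Spec_zabbix_key_to_signifai_key; infer_instance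

-- ===== CLAIM (what is proved, stated in full; the proofs are below) =====
def Claim_equal_zabbix_key_to_signifai_key : Prop := ∀ (k : String), Dom_zabbix_key_to_signifai_key k → Spec_zabbix_key_to_signifai_key k (zabbix_key_to_signifai_key k)

-- ===== LEMMAS AND PROOFS =====

-- replace with a single-character pattern is a flatMap over the characters
theorem replace_go_single (o : Char) (nw : List Char) :
    ∀ (l : List Char) (fuel : Nat) (acc : List Char), l.length ≤ fuel →
      PySem.Chars.replace.go [o] nw fuel l acc
        = acc.reverse ++ l.flatMap (fun c => if c = o then nw else [c]) := by
  intro l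
  induction l with
  | nil =>
    intro fuel acc _
    cases fuel <;> simp [PySem.Chars.replace.go]
  | cons c t ih =>
    intro fuel acc h
    cases fuel with
    | zero => simp at h
    | succ f =>
      have ht : t.length ≤ f := by simpa using h
      by_cases hc : o = c
      · have hpre : List.isPrefixOf [o] (c :: t) = true := by
          simp [List.isPrefixOf, hc]
        subst hc
        simp only [PySem.Chars.replace.go, hpre, List.length_cons, List.length_nil,
          Nat.zero_add, List.drop_one, List.tail_cons]
        rw [ih _ _ ht]
        simp
      · have hpre : List.isPrefixOf [o] (c :: t) = false := by
          simp [List.isPrefixOf, hc]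
        simp only [PySem.Chars.replace.go, hpre]
        rw [ih _ _ ht]
        simp [if_neg (fun h : c = o => hc h.symm)]

theorem replace_single (cs : List Char) (o : Char) (nw : List Char) :
    PySem.Chars.replace cs [o] nw = cs.flatMap (fun c => if c = o then nw else [c]) := by
  simp only [PySem.Chars.replace, List.isEmpty]
  rw [replace_go_single o nw cs cs.length [] le_rfl]
  simp

-- the four single-character replaces compose into one pvMapChar pass, because
-- no replacement output contains a later source character
theorem chain_eq_flatMap (ds : List Char) :
    PySem.Chars.replace
      (PySem.Chars.replace
        (PySem.Chars.replace
          (PySem.Chars.replace ds ['.'] ['/'])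
          [' '] ['_'])
        ['('] [])
      [')'] []
      = ds.flatMap pvMapChar := by
  induction ds with
  | nil => simp [replace_single]
  | cons c t ih =>
    simp only [replace_single, List.flatMap_cons] at *
    by_cases h1 : c = '.'
    · simp [h1, pvMapChar, ih]
    · by_cases h2 : c = ' '
      · simp [h2, pvMapChar, ih]
      · by_cases h3 : c = '('
        · simp [h3, pvMapChar, ih]
        · by_cases h4 : c = ')'
          · simp [h4, pvMapChar, ih]
          · simp only [if_neg h1, if_neg h2, List.singleton_append, List.flatMap_cons,
              if_neg h3, if_neg h4]
            have : pvMapChar c = [c] := by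
              unfold pvMapChar
              split <;> first | rfl | (exfalso; first | exact h1 rfl | exact h2 rfl | exact h3 rfl | exact h4 rfl)
            simp [this, ih]

-- ===== VERDICT (by name: the statement is the Claim_ definition above) =====
theorem zabbix_key_to_signifai_key_spec : Claim_equal_zabbix_key_to_signifai_key := by
  intro k _
  show _ = _
  unfold zabbix_key_to_signifai_key zabbix_key_to_signifai_key_alt
  simp only [List.foldl, PySem.Str.replace, PySem.Str.lower]
  simp only [String.toList_ofList]
  rw [show (".".toList) = ['.'] from rfl, show ("/".toList) = ['/'] from rfl,
    show (" ".toList) = [' '] from rfl, show ("_".toList) = ['_'] from rfl,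
    show ("(".toList) = ['('] from rfl, show (")".toList) = [')'] from rfl,
    show ("".toList) = ([] : List Char) from rfl, chain_eq_flatMap]
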